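-- pv_equiv track=rewrite | github.com/GrinRus/ai_driven_dev | tools/tasklist_check.py | subsection_lines
-- ===== SOURCE A (Python) =====
-- from typing import Iterable, List, Optional
--
-- def subsection_lines(section_lines: List[str], heading: str) -> List[str]:
--     start = None
--     for idx, line in enumerate(section_lines):
--         if line.strip().lower() == heading.lower():
--             start = idx + 1
--             break
--     if start is None:
--         return []
--     end = len(section_lines)
--     for idx in range(start, len(section_lines)):
--         if section_lines[idx].strip().startswith("### "):
--             end = idx
--             break
--     return section_lines[start:end]
-- ===== SOURCE B (Python) =====
-- def subsection_lines(section_lines, heading):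
--     target = heading.lower()
--     out = []
--     collecting = False
--     for line in section_lines:
--         if collecting:
--             if line.strip().startswith("### "):
--                 break
--             out.append(line)
--         elif line.strip().lower() == target:
--             collecting = True
--     return out
-- ===== Notes on version B (the rewrite author's own statement) =====
-- stated objective: simpler
-- what changed: Replaced A's two index-based scans (find heading index, then find end index, then slice) by one state-machine pass with a collecting flag and an accumulator, computing heading.lower() once instead of once per line.
import Mathlib
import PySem

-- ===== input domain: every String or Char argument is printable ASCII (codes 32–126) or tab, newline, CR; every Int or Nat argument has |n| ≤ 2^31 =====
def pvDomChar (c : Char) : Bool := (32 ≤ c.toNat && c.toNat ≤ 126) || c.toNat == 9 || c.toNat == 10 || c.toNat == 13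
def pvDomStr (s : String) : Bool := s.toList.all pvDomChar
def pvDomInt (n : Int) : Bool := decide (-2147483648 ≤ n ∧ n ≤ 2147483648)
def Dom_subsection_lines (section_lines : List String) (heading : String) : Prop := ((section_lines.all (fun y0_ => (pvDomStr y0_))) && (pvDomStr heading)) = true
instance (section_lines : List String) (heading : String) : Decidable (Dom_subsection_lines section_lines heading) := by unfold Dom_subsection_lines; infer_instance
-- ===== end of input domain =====

-- B replaces A's two index scans + slice by one state-machine pass with a collecting flag (simpler; same O(n)).

-- ===== PORT A =====
-- first loop: enumerate with break, returning start = idx + 1 on the first match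
def pvAStart (xs : List String) (heading : String) (idx : Nat) : Option Nat :=
  match xs with
  | [] => none
  | l :: ls =>
    if PySem.Str.lower (PySem.Str.strip l) = PySem.Str.lower heading then some (idx + 1)
    else pvAStart ls heading (idx + 1)

-- second loop: for idx in range(start, len), break at the first "### " line; else end = len
def pvAEnd (xs : List String) (idx len : Nat) : Nat :=
  if idx < len then
    if PySem.Str.startswith (PySem.Str.strip (xs.getD idx "")) "### " then idx
    else pvAEnd xs (idx + 1) len
  else len
termination_by len - idx

def subsection_lines (section_lines : List String) (heading : String) : List String :=
  match pvAStart section_lines heading 0 with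
  | none => []
  | some start =>
    PySem.List.slice section_lines (some (start : Int))
      (some ((pvAEnd section_lines start section_lines.length : Nat) : Int))

-- ===== PORT B =====
def pvBGo (xs : List String) (target : String) (collecting : Bool) (out : List String) : List String :=
  match xs with
  | [] => out
  | l :: ls =>
    if collecting then
      if PySem.Str.startswith (PySem.Str.strip l) "### " then out
      else pvBGo ls target collecting (out ++ [l])
    else if PySem.Str.lower (PySem.Str.strip l) = target then pvBGo ls target true out
    else pvBGo ls target collecting out

def subsection_lines_alt (section_lines : List String) (heading : String) : List String :=
  pvBGo section_lines (PySem.Str.lower heading) false []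

-- ===== PRECONDITION & SPEC =====
def Spec_subsection_lines (section_lines : List String) (heading : String) (out : List String) : Prop := out = subsection_lines_alt section_lines heading
instance (section_lines : List String) (heading : String) (out : List String) : Decidable (Spec_subsection_lines section_lines heading out) := by unfold Spec_subsection_lines; infer_instance

-- ===== CLAIM (what is proved, stated in full; the proofs are below) =====
def Claim_equal_subsection_lines : Prop := ∀ (section_lines : List String) (heading : String), Dom_subsection_lines section_lines heading → Spec_subsection_lines section_lines heading (subsection_lines section_lines heading)

-- ===== LEMMAS AND PROOFS =====

-- abbreviations for the two line tests (proof-side only)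
def pvIsHdr (l : String) : Bool := PySem.Str.startswith (PySem.Str.strip l) "### "
theorem pvBGo_eq (l : String) (ls : List String) (target : String) (c : Bool) (out : List String) :
    pvBGo (l :: ls) target c out =
      if c then (if pvIsHdr l then out else pvBGo ls target c (out ++ [l]))
      else if PySem.Str.lower (PySem.Str.strip l) = target then pvBGo ls target true out
      else pvBGo ls target c out := by
  simp only [pvBGo, pvIsHdr]
  split_ifs <;> rfl

-- once collecting, B appends the takeWhile-prefix of the remaining lines
theorem pvBGo_collecting (xs : List String) (target : String) (out : List String) :
    pvBGo xs target true out = out ++ xs.takeWhile (fun l => ! pvIsHdr l) := by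
  induction xs generalizing out with
  | nil => simp [pvBGo]
  | cons l ls ih =>
    rw [pvBGo_eq]
    cases h : pvIsHdr l with
    | true => simp [h]
    | false => simp [h, ih]

-- shifting the running index of A's first loop
theorem pvAStart_shift (xs : List String) (heading : String) (idx : Nat) :
    pvAStart xs heading (idx + 1) = (pvAStart xs heading idx).map (· + 1) := by
  induction xs generalizing idx with
  | nil => simp [pvAStart]
  | cons l ls ih =>
    by_cases h : PySem.Str.lower (PySem.Str.strip l) = PySem.Str.lower heading
    · simp only [pvAStart, if_pos h, Option.map_some]
    · simp only [pvAStart, if_neg h, ih]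

-- A's second loop + slice compute the takeWhile-prefix of the dropped suffix
theorem pvAEnd_slice (xs : List String) (idx : Nat) (hle : idx ≤ xs.length) :
    PySem.List.slice xs (some (idx : Int)) (some ((pvAEnd xs idx xs.length : Nat) : Int))
      = (xs.drop idx).takeWhile (fun l => ! pvIsHdr l) := by
  rw [PySem.List.slice_natCast]
  have main : ∀ n idx, idx ≤ xs.length → xs.length - idx ≤ n →
      (xs.drop idx).take (pvAEnd xs idx xs.length - idx)
        = (xs.drop idx).takeWhile (fun l => ! pvIsHdr l) := by
    intro n
    induction n with
    | zero =>
      intro idx h1 h2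
      have hlen : xs.length ≤ idx := by omega
      rw [List.drop_of_length_le hlen]
      simp
    | succ n ih =>
      intro idx h1 h2
      by_cases hlt : idx < xs.length
      · have hdrop : xs.drop idx = xs.getD idx "" :: xs.drop (idx + 1) := by
          rw [List.getD_eq_getElem?_getD, List.getElem?_eq_getElem hlt]
          exact List.drop_eq_getElem_cons hlt
        have hunf : pvAEnd xs idx xs.length =
            if pvIsHdr (xs.getD idx "") then idx else pvAEnd xs (idx + 1) xs.length := by
          rw [pvAEnd, if_pos hlt]
          simp only [pvIsHdr]
          split_ifs <;> rfl
        cases hp : pvIsHdr (xs.getD idx "") with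
        | true =>
          rw [hunf, if_pos hp, hdrop, Nat.sub_self, List.take_zero, List.takeWhile_cons]
          simp only [hp, Bool.not_true, Bool.false_eq_true, if_false]
        | false =>
          rw [hunf, if_neg (by simp only [hp, Bool.false_eq_true, not_false_eq_true])]
          have hrec := ih (idx + 1) (by omega) (by omega)
          have hend_ge : ∀ m j, xs.length - j ≤ m → j ≤ xs.length → j ≤ pvAEnd xs j xs.length := by
            intro m
            induction m with
            | zero => intro j hj hj2; rw [pvAEnd]; split_ifs <;> omega
            | succ m ihm =>
              intro j hj hj2
              rw [pvAEnd]
              split_ifs with c1 c2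
              · omega
              · exact le_trans (by omega) (ihm (j + 1) (by omega) (by omega))
              · omega
          have hge : idx + 1 ≤ pvAEnd xs (idx + 1) xs.length :=
            hend_ge (xs.length - (idx + 1)) (idx + 1) (le_refl _) (by omega)
          rw [hdrop]
          rw [show pvAEnd xs (idx + 1) xs.length - idx
                = (pvAEnd xs (idx + 1) xs.length - (idx + 1)) + 1 by omega]
          rw [List.take_succ_cons, List.takeWhile_cons]
          simp only [hp, Bool.not_false, if_true, hrec]
      · have hlen : xs.length ≤ idx := by omega
        rw [List.drop_of_length_le hlen]
        simp
  exact main xs.length idx hle (by omega)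

-- the start index A finds is in range
theorem pvAStart_le (xs : List String) (heading : String) (idx s : Nat)
    (h : pvAStart xs heading idx = some s) : idx < s ∧ s ≤ idx + xs.length := by
  induction xs generalizing idx with
  | nil => simp [pvAStart] at h
  | cons l ls ih =>
    rw [pvAStart] at h
    split_ifs at h with hc
    · simp only [Option.some_inj] at h
      simp only [List.length_cons]
      omega
    · obtain ⟨ha, hb⟩ := ih (idx + 1) h
      simp only [List.length_cons]
      omega

-- equation lemmas for A's port
theorem pvA_none (xs : List String) (heading : String) (hs : pvAStart xs heading 0 = none) :
    subsection_lines xs heading = [] := by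
  unfold subsection_lines; rw [hs]

theorem pvA_some (xs : List String) (heading : String) (s : Nat)
    (hs : pvAStart xs heading 0 = some s) :
    subsection_lines xs heading
      = PySem.List.slice xs (some (s : Int)) (some ((pvAEnd xs s xs.length : Nat) : Int)) := by
  unfold subsection_lines; rw [hs]

theorem pv_main (xs : List String) (heading : String) :
    subsection_lines xs heading = subsection_lines_alt xs heading := by
  induction xs with
  | nil => simp [subsection_lines, subsection_lines_alt, pvAStart, pvBGo]
  | cons l ls ih =>
    by_cases hc : PySem.Str.lower (PySem.Str.strip l) = PySem.Str.lower heading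
    · rw [pvA_some (l :: ls) heading 1 (by rw [pvAStart, if_pos hc])]
      rw [pvAEnd_slice (l :: ls) 1 (by simp)]
      unfold subsection_lines_alt
      rw [pvBGo_eq, if_neg (by simp), if_pos hc, pvBGo_collecting]
      simp
    · have hstep : pvAStart (l :: ls) heading 0 = (pvAStart ls heading 0).map (· + 1) := by
        rw [pvAStart, if_neg hc]
        exact pvAStart_shift ls heading 0
      have hB : subsection_lines_alt (l :: ls) heading = subsection_lines_alt ls heading := by
        unfold subsection_lines_alt
        rw [pvBGo_eq, if_neg (by simp), if_neg hc]
      cases hs : pvAStart ls heading 0 with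
      | none =>
        rw [pvA_none (l :: ls) heading (by rw [hstep, hs]; rfl), hB, ← ih,
          pvA_none ls heading hs]
      | some s =>
        obtain ⟨hpos, hsle⟩ := pvAStart_le ls heading 0 s hs
        have hle : s ≤ ls.length := by omega
        have h1 : s + 1 ≤ (l :: ls).length := by simp only [List.length_cons]; omega
        rw [pvA_some (l :: ls) heading (s + 1) (by rw [hstep, hs]; rfl), hB, ← ih,
          pvA_some ls heading s hs]
        rw [pvAEnd_slice (l :: ls) (s + 1) h1, pvAEnd_slice ls s hle, List.drop_succ_cons]

-- ===== VERDICT (by name: the statement is the Claim_ definition above) =====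
theorem subsection_lines_spec : Claim_equal_subsection_lines := by
  intro xs heading _
  exact pv_main xs heading
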